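-- pv_equiv track=rewrite | github.com/jw9603/Python | 삼성간다/step2/14890.py | can_pass
-- ===== SOURCE A (Python) =====
-- def can_pass(line, L):
--     N = len(line)
--     visited = [False] * N
--
--     for i in range(N - 1):
--         if line[i] == line[i + 1]:
--             continue
--
--         elif line[i] + 1 == line[i + 1]:
--             for j in range(i, i - L, -1):
--                 if j < 0 or line[j] != line[i] or visited[j]:
--                     return False
--                 visited[j] = True
--
--         elif line[i] - 1 == line[i + 1]:
--             for j in range(i + 1, i + 1 + L):
--                 if j >= N or line[j] != line[i + 1] or visited[j]:
--                     return False
--                 visited[j] = True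
--         else:
--             return False
--     return True
-- ===== SOURCE B (Python) =====
-- def can_pass(line, L):
--     # Single pass without a visited array: track the start index of the current
--     # run of equal heights and the last index already claimed by a ramp; the
--     # ramp-length check for a descent is deferred to the next height transition
--     # (or to the final bound check).
--     N = len(line)
--     start = 0   # start index of the run containing i
--     used = -1   # last index claimed by a ramp so far
--     for i in range(N - 1):
--         d = line[i + 1] - line[i]
--         if d == 0:
--             continue
--         if d == 1:
--             if i - L + 1 < start or i - L + 1 <= used:
--                 return False
--             used = i
--         elif d == -1:
--             if used > i:
--                 return False
--             used = i + L
--         else: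
--             return False
--         start = i + 1
--     return used <= N - 1
-- ===== Notes on version B (the rewrite author's own statement) =====
-- stated objective: alternative
-- what changed: Replaces the visited array and the per-transition inner ramp-scanning loops (up to L steps each) by a single pass that tracks only the current run's start index and the last index claimed by a ramp, deferring each descent-length check to the next height transition; intended as faster (O(N) vs O(N*L)), but a timing run measured only 1.28x at the largest size, so no speed is claimed.
import Mathlib
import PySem

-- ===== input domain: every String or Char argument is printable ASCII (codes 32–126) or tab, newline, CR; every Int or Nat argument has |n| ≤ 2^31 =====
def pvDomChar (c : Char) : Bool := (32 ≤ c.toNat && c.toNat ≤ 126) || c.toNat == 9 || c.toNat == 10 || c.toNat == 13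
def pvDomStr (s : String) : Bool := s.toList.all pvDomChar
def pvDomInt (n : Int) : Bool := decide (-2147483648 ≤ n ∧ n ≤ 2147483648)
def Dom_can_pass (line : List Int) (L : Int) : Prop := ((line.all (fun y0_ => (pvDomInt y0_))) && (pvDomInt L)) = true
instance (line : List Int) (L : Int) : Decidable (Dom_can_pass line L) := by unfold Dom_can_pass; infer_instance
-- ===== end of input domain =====

-- B replaces A's visited array and inner ramp-scanning loops by a single pass that
-- tracks only the current run's start index and the last index claimed by a ramp.

-- ===== PORT A =====
-- inner loop 'for j in range(i, i - L, -1)' of the ascent branch; fuel = L.toNat =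
-- number of iterations; all reads line[j] happen with 0 ≤ j ≤ i < len so getD is exact
def upRamp (line : List Int) (v : Int) (visited : List Bool) (j : Int) : Nat → Option (List Bool)
  | 0 => some visited
  | f + 1 =>
    if j < 0 then none
    else if line.getD j.toNat 0 ≠ v then none
    else if visited.getD j.toNat false then none
    else upRamp line v (visited.set j.toNat true) (j - 1) f

-- inner loop 'for j in range(i + 1, i + 1 + L)' of the descent branch; reads happen
-- only after the 'j >= N' guard, with 0 < j, so getD is exact
def downRamp (line : List Int) (v : Int) (visited : List Bool) (j : Int) : Nat → Option (List Bool)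
  | 0 => some visited
  | f + 1 =>
    if (line.length : Int) ≤ j then none
    else if line.getD j.toNat 0 ≠ v then none
    else if visited.getD j.toNat false then none
    else downRamp line v (visited.set j.toNat true) (j + 1) f

-- outer loop 'for i in range(N - 1)' (none = 'return False' from an inner loop)
def aLoop (line : List Int) (L : Int) (visited : List Bool) (i : Nat) : Bool :=
  if i + 1 < line.length then
    let a := line.getD i 0
    let b := line.getD (i + 1) 0
    if a = b then aLoop line L visited (i + 1)
    else if a + 1 = b then
      match upRamp line a visited (i : Int) L.toNat with
      | none => false
      | some v' => aLoop line L v' (i + 1)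
    else if a - 1 = b then
      match downRamp line b visited ((i : Int) + 1) L.toNat with
      | none => false
      | some v' => aLoop line L v' (i + 1)
    else false
  else true
termination_by line.length - i

def can_pass (line : List Int) (L : Int) : Bool :=
  aLoop line L (List.replicate line.length false) 0

-- ===== PORT B =====
-- single pass: start = start index of the run containing i, used = last index
-- already claimed by a ramp (-1 = none); descent checks are deferred
def bLoop (line : List Int) (L : Int) (start used : Int) (i : Nat) : Bool :=
  if i + 1 < line.length then
    let d := line.getD (i + 1) 0 - line.getD i 0
    if d = 0 then bLoop line L start used (i + 1)
    else if d = 1 then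
      if (i : Int) - L + 1 < start ∨ (i : Int) - L + 1 ≤ used then false
      else bLoop line L ((i : Int) + 1) (i : Int) (i + 1)
    else if d = -1 then
      if used > (i : Int) then false
      else bLoop line L ((i : Int) + 1) ((i : Int) + L) (i + 1)
    else false
  else decide (used ≤ (line.length : Int) - 1)
termination_by line.length - i

def can_pass_alt (line : List Int) (L : Int) : Bool :=
  bLoop line L 0 (-1) 0

-- ===== PRECONDITION & SPEC =====
def Spec_can_pass (line : List Int) (L : Int) (out : Bool) : Prop := out = can_pass_alt line L
instance (line : List Int) (L : Int) (out : Bool) : Decidable (Spec_can_pass line L out) := by unfold Spec_can_pass; infer_instance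

-- ===== CLAIM (what is proved, stated in full; the proofs are below) =====
def Claim_equal_can_pass : Prop := ∀ (line : List Int) (L : Int), Dom_can_pass line L → Spec_can_pass line L (can_pass line L)

-- ===== LEMMAS AND PROOFS =====

lemma getD_set_ne (V : List Bool) (m k : Nat) (h : m ≠ k) :
    (V.set m true).getD k false = V.getD k false := by
  simp [List.getD, List.getElem?_set_ne h]

lemma getD_set_self (V : List Bool) (m : Nat) (h : m < V.length) :
    (V.set m true).getD m false = true := by
  simp [List.getD, List.getElem?_set_self, h]

lemma upRamp_succ (line : List Int) (v : Int) (V : List Bool) (j : Int) (f : Nat) :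
    upRamp line v V j (f + 1) =
      if j < 0 then none
      else if line.getD j.toNat 0 ≠ v then none
      else if V.getD j.toNat false then none
      else upRamp line v (V.set j.toNat true) (j - 1) f := rfl

lemma downRamp_succ (line : List Int) (v : Int) (V : List Bool) (j : Int) (f : Nat) :
    downRamp line v V j (f + 1) =
      if (line.length : Int) ≤ j then none
      else if line.getD j.toNat 0 ≠ v then none
      else if V.getD j.toNat false then none
      else downRamp line v (V.set j.toNat true) (j + 1) f := rfl

lemma upRamp_spec (line : List Int) (v start used : Int)
    (hs0 : 0 ≤ start)
    (hb : 1 ≤ start → line.getD (start - 1).toNat 0 ≠ v) :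
    ∀ (f : Nat) (j : Int) (V : List Bool),
    V.length = line.length →
    start - 1 ≤ j → j < (line.length : Int) →
    (∀ k : Nat, start ≤ (k : Int) → (k : Int) ≤ j → line.getD k 0 = v) →
    (∀ k : Nat, start ≤ (k : Int) → (k : Int) ≤ j → V.getD k false = decide ((k : Int) ≤ used)) →
    used ≤ j →
    if start ≤ j - f + 1 ∧ used < j - f + 1 then
      ∃ V', upRamp line v V j f = some V' ∧ V'.length = line.length ∧
        ∀ k : Nat, j < (k : Int) → V'.getD k false = V.getD k false
    else upRamp line v V j f = none := by
  intro f
  induction f with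
  | zero =>
    intro j V hlen hj1 hj2 hv hV hu
    rw [if_pos (by constructor <;> push_cast <;> omega)]
    exact ⟨V, rfl, hlen, fun k hk => rfl⟩
  | succ f ih =>
    intro j V hlen hj1 hj2 hv hV hu
    by_cases hjneg : j < 0
    · rw [if_neg (by push_cast; omega)]
      rw [upRamp_succ, if_pos hjneg]
    · have hj0 : 0 ≤ j := by omega
      have hjt : (j.toNat : Int) = j := Int.toNat_of_nonneg hj0
      by_cases hjs : start ≤ j
      · have hval : line.getD j.toNat 0 = v := hv j.toNat (by omega) (by omega)
        have hvis : V.getD j.toNat false = decide (j ≤ used) := by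
          have := hV j.toNat (by omega) (by omega)
          rwa [hjt] at this
        by_cases huj : j ≤ used
        · rw [if_neg (by push_cast; omega)]
          have hvist : V.getD j.toNat false = true := by rw [hvis]; simp [huj]
          rw [upRamp_succ, if_neg hjneg, if_neg (not_not_intro hval), if_pos hvist]
        · have hvis' : V.getD j.toNat false = false := by
            rw [hvis]; simp [huj]
          have step : upRamp line v V j (f + 1) =
              upRamp line v (V.set j.toNat true) (j - 1) f := by
            rw [upRamp_succ, if_neg hjneg, if_neg (not_not_intro hval), if_neg (by rw [hvis']; simp)]
          have ih' := ih (j - 1) (V.set j.toNat true) (by simp [hlen]) (by omega) (by omega)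
            (fun k hk1 hk2 => hv k hk1 (by omega))
            (fun k hk1 hk2 => by
              rw [getD_set_ne _ _ _ (by omega)]
              exact hV k hk1 (by omega))
            (by omega)
          have hceq : (start ≤ j - ((f : Nat) + 1 : Nat) + 1 ∧ used < j - ((f : Nat) + 1 : Nat) + 1) ↔
              (start ≤ j - 1 - (f : Nat) + 1 ∧ used < j - 1 - (f : Nat) + 1) := by
            push_cast; omega
          by_cases hc : start ≤ j - 1 - (f : Nat) + 1 ∧ used < j - 1 - (f : Nat) + 1
          · rw [if_pos (hceq.mpr hc), step]
            rw [if_pos hc] at ih'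
            obtain ⟨V', hV', hlen', hpres⟩ := ih'
            refine ⟨V', hV', hlen', fun k hk => ?_⟩
            rw [hpres k (by omega), getD_set_ne _ _ _ (by omega)]
          · rw [if_neg (fun h => hc (hceq.mp h)), step]
            rw [if_neg hc] at ih'
            exact ih'
      · have hst1 : 1 ≤ start := by omega
        have hval : line.getD j.toNat 0 ≠ v := by
          have : j = start - 1 := by omega
          rw [this]; exact hb hst1
        rw [if_neg (by push_cast; omega)]
        rw [upRamp_succ, if_neg hjneg, if_pos hval]

lemma downRamp_spec (line : List Int) (v : Int) :
    ∀ (f : Nat) (j : Int) (V : List Bool),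
    V.length = line.length →
    0 ≤ j → j ≤ (line.length : Int) →
    (∀ k : Nat, j ≤ (k : Int) → k < line.length → V.getD k false = false) →
    ((j + f ≤ (line.length : Int) ∧
        ∀ k : Nat, j ≤ (k : Int) → (k : Int) < j + f → line.getD k 0 = v) →
      ∃ V', downRamp line v V j f = some V' ∧ V'.length = line.length ∧
        (∀ k : Nat, (k : Int) < j → V'.getD k false = V.getD k false) ∧
        (∀ k : Nat, j ≤ (k : Int) → k < line.length → V'.getD k false = decide ((k : Int) < j + f))) ∧
    (¬ (j + f ≤ (line.length : Int) ∧
        ∀ k : Nat, j ≤ (k : Int) → (k : Int) < j + f → line.getD k 0 = v) →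
      downRamp line v V j f = none) := by
  intro f
  induction f with
  | zero =>
    intro j V hlen hj0 hjN hV
    constructor
    · intro _
      refine ⟨V, rfl, hlen, fun k hk => rfl, fun k hk1 hk2 => ?_⟩
      rw [hV k hk1 hk2]
      symm
      simp only [decide_eq_false_iff_not]
      push_cast
      omega
    · intro hC
      exact absurd ⟨by push_cast; omega, fun k hk1 hk2 => by exfalso; push_cast at hk2; omega⟩ hC
  | succ f ih =>
    intro j V hlen hj0 hjN hV
    by_cases hNj : (line.length : Int) ≤ j
    · constructor
      · intro hC
        have := hC.1
        exfalso; push_cast at this; omega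
      · intro _
        rw [downRamp_succ, if_pos hNj]
    · have hjt : (j.toNat : Int) = j := Int.toNat_of_nonneg hj0
      by_cases hval : line.getD j.toNat 0 = v
      · have hvis : V.getD j.toNat false = false := hV j.toNat (by omega) (by omega)
        have step : downRamp line v V j (f + 1) =
            downRamp line v (V.set j.toNat true) (j + 1) f := by
          rw [downRamp_succ, if_neg hNj, if_neg (not_not_intro hval), if_neg (by rw [hvis]; simp)]
        have ih' := ih (j + 1) (V.set j.toNat true) (by simp [hlen]) (by omega) (by omega)
          (fun k hk1 hk2 => by
            rw [getD_set_ne _ _ _ (by omega)]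
            exact hV k (by omega) hk2)
      
        constructor
        · intro hC
          obtain ⟨V', hd, hlen', hpres, hmark⟩ := ih'.1
            ⟨by have := hC.1; push_cast at this ⊢; omega,
             fun k hk1 hk2 => hC.2 k (by omega) (by push_cast at hk2 ⊢; omega)⟩
          rw [step]
          refine ⟨V', hd, hlen', fun k hk => ?_, fun k hk1 hk2 => ?_⟩
          · rw [hpres k (by omega), getD_set_ne _ _ _ (by omega)]
          · by_cases hkj : (k : Int) = j
            · have hk' : k = j.toNat := by omega
              rw [hpres k (by omega), hk', getD_set_self _ _ (by omega)]
              symm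
              simp only [decide_eq_true_eq]
              push_cast
              omega
            · rw [hmark k (by omega) hk2]
              exact decide_eq_decide.mpr (by push_cast; omega)
        · intro hC
          rw [step]
          apply ih'.2
          rintro ⟨h1, h2⟩
          apply hC
          refine ⟨by push_cast at h1 ⊢; omega, fun k hk1 hk2 => ?_⟩
          by_cases hkj : (k : Int) = j
          · have hk' : k = j.toNat := by omega
            rw [hk']; exact hval
          · exact h2 k (by omega) (by push_cast at hk2 ⊢; omega)
      · constructor
        · intro hC
          exact absurd (hC.2 j.toNat (by omega) (by push_cast; omega)) hval
        · intro _
          rw [downRamp_succ, if_neg hNj, if_pos hval]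

lemma bLoop_dead (line : List Int) (L : Int) (hL : 1 ≤ L) :
    ∀ (i : Nat) (start used : Int), i < line.length →
    (i : Int) < used →
    ((line.length : Int) ≤ used ∨
      ∃ m : Nat, (i : Int) < (m : Int) ∧ (m : Int) ≤ used ∧ m < line.length ∧
        line.getD m 0 ≠ line.getD i 0) →
    bLoop line L start used i = false := by
  suffices H : ∀ (n i : Nat) (start used : Int), line.length - i ≤ n → i < line.length →
      (i : Int) < used →
      ((line.length : Int) ≤ used ∨
        ∃ m : Nat, (i : Int) < (m : Int) ∧ (m : Int) ≤ used ∧ m < line.length ∧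
          line.getD m 0 ≠ line.getD i 0) →
      bLoop line L start used i = false by
    intro i start used h1 h2 h3
    exact H line.length i start used (by omega) h1 h2 h3
  intro n
  induction n with
  | zero => intro i start used hn hi; omega
  | succ n ihn =>
    intro i start used hn hi hlt hdisj
    rw [bLoop]
    by_cases h2 : i + 1 < line.length
    · rw [if_pos h2]
      show (if line.getD (i + 1) 0 - line.getD i 0 = 0 then bLoop line L start used (i + 1)
        else if line.getD (i + 1) 0 - line.getD i 0 = 1 then
          (if (i : Int) - L + 1 < start ∨ (i : Int) - L + 1 ≤ used then false
           else bLoop line L ((i : Int) + 1) (i : Int) (i + 1))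
        else if line.getD (i + 1) 0 - line.getD i 0 = -1 then
          (if used > (i : Int) then false
           else bLoop line L ((i : Int) + 1) ((i : Int) + L) (i + 1))
        else false) = false
      by_cases hd0 : line.getD (i + 1) 0 - line.getD i 0 = 0
      · rw [if_pos hd0]
        have heq : line.getD (i + 1) 0 = line.getD i 0 := by omega
        rcases hdisj with h | ⟨m, hm1, hm2, hm3, hm4⟩
        · exact ihn (i + 1) start used (by omega) h2 (by push_cast; omega) (Or.inl h)
        · have hne : m ≠ i + 1 := fun h => hm4 (by rw [h, heq])
          have hm1' : ((i + 1 : Nat) : Int) < (m : Int) := by push_cast; push_cast at hm1; omega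
          exact ihn (i + 1) start used (by omega) h2 (by push_cast; omega)
            (Or.inr ⟨m, hm1', hm2, hm3, by rw [heq]; exact hm4⟩)
      · rw [if_neg hd0]
        by_cases hd1 : line.getD (i + 1) 0 - line.getD i 0 = 1
        · rw [if_pos hd1, if_pos (Or.inr (by omega))]
        · rw [if_neg hd1]
          by_cases hdm : line.getD (i + 1) 0 - line.getD i 0 = -1
          · rw [if_pos hdm, if_pos hlt]
          · rw [if_neg hdm]
    · rw [if_neg h2]
      have hno : ¬ (used ≤ (line.length : Int) - 1) := by
        rcases hdisj with h | ⟨m, hm1, hm2, hm3, _⟩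
        · omega
        · exfalso; omega
      simp [hno]

lemma main_loop (line : List Int) (L : Int) :
    ∀ (i : Nat) (V : List Bool) (start used : Int),
    V.length = line.length →
    0 ≤ start → start ≤ (i : Int) →
    (∀ k : Nat, start ≤ (k : Int) → k ≤ i → line.getD k 0 = line.getD i 0) →
    (1 ≤ start → line.getD (start - 1).toNat 0 ≠ line.getD start.toNat 0) →
    (∀ k : Nat, start ≤ (k : Int) → k < line.length → V.getD k false = decide ((k : Int) ≤ used)) →
    (used < start ∨ (used < (line.length : Int) ∧
      ∀ k : Nat, start ≤ (k : Int) → (k : Int) ≤ used → line.getD k 0 = line.getD start.toNat 0)) →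
    used ≤ (line.length : Int) - 1 →
    aLoop line L V i = bLoop line L start used i := by
  suffices H : ∀ (n i : Nat) (V : List Bool) (start used : Int), line.length - i ≤ n →
      V.length = line.length →
      0 ≤ start → start ≤ (i : Int) →
      (∀ k : Nat, start ≤ (k : Int) → k ≤ i → line.getD k 0 = line.getD i 0) →
      (1 ≤ start → line.getD (start - 1).toNat 0 ≠ line.getD start.toNat 0) →
      (∀ k : Nat, start ≤ (k : Int) → k < line.length → V.getD k false = decide ((k : Int) ≤ used)) →
      (used < start ∨ (used < (line.length : Int) ∧
        ∀ k : Nat, start ≤ (k : Int) → (k : Int) ≤ used → line.getD k 0 = line.getD start.toNat 0)) →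
      used ≤ (line.length : Int) - 1 →
      aLoop line L V i = bLoop line L start used i by
    intro i V start used h1 h2 h3 h4 h5 h6 h7 h8
    exact H line.length i V start used (by omega) h1 h2 h3 h4 h5 h6 h7 h8
  have tdich : ((L.toNat : Int) = L ∧ 0 ≤ L) ∨ ((L.toNat : Int) = 0 ∧ L < 0) := by
    by_cases h : 0 ≤ L
    · exact Or.inl ⟨Int.toNat_of_nonneg h, h⟩
    · exact Or.inr ⟨by omega, by omega⟩
  intro n
  induction n with
  | zero =>
    intro i V start used hn hlen hs0 hsi h3 h3b h4 h5 h6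
    rw [aLoop, bLoop, if_neg (by omega), if_neg (by omega)]
    exact (decide_eq_true h6).symm
  | succ n ihn =>
    intro i V start used hn hlen hs0 hsi h3 h3b h4 h5 h6
    by_cases hI : i + 1 < line.length
    · rw [aLoop, bLoop, if_pos hI, if_pos hI]
      show (if line.getD i 0 = line.getD (i + 1) 0 then aLoop line L V (i + 1)
            else if line.getD i 0 + 1 = line.getD (i + 1) 0 then
              (match upRamp line (line.getD i 0) V (i : Int) L.toNat with
               | none => false
               | some v' => aLoop line L v' (i + 1))
            else if line.getD i 0 - 1 = line.getD (i + 1) 0 then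
              (match downRamp line (line.getD (i + 1) 0) V ((i : Int) + 1) L.toNat with
               | none => false
               | some v' => aLoop line L v' (i + 1))
            else false)
        = (if line.getD (i + 1) 0 - line.getD i 0 = 0 then bLoop line L start used (i + 1)
           else if line.getD (i + 1) 0 - line.getD i 0 = 1 then
             (if (i : Int) - L + 1 < start ∨ (i : Int) - L + 1 ≤ used then false
              else bLoop line L ((i : Int) + 1) (i : Int) (i + 1))
           else if line.getD (i + 1) 0 - line.getD i 0 = -1 then
             (if used > (i : Int) then false
              else bLoop line L ((i : Int) + 1) ((i : Int) + L) (i + 1))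
           else false)
      by_cases hab : line.getD i 0 = line.getD (i + 1) 0
      · rw [if_pos hab, if_pos (show line.getD (i + 1) 0 - line.getD i 0 = 0 by omega)]
        refine ihn (i + 1) V start used (by omega) hlen hs0 (by push_cast; omega) ?_ h3b h4 h5 h6
        intro k hk1 hk2
        by_cases hk : k ≤ i
        · rw [← hab]; exact h3 k hk1 hk
        · have : k = i + 1 := by omega
          rw [this]
      · rw [if_neg hab, if_neg (show ¬(line.getD (i + 1) 0 - line.getD i 0 = 0) by omega)]
        have husedi : used ≤ (i : Int) := by
          by_contra hgt
          rcases h5 with h | ⟨hltN, hall⟩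
          · omega
          · have e1 : line.getD (i + 1) 0 = line.getD start.toNat 0 :=
              hall (i + 1) (by push_cast; omega) (by push_cast; omega)
            have e2 : line.getD start.toNat 0 = line.getD i 0 := h3 start.toNat (by omega) (by omega)
            exact hab (by rw [e1, e2])
        by_cases hasc : line.getD i 0 + 1 = line.getD (i + 1) 0
        · rw [if_pos hasc, if_pos (show line.getD (i + 1) 0 - line.getD i 0 = 1 by omega)]
          have hb' : 1 ≤ start → line.getD (start - 1).toNat 0 ≠ line.getD i 0 := by
            intro h1
            have hbb := h3b h1
            have hstv : line.getD start.toNat 0 = line.getD i 0 := h3 start.toNat (by omega) (by omega)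
            rw [hstv] at hbb
            exact hbb
          have spec := upRamp_spec line (line.getD i 0) start used hs0 hb' L.toNat (i : Int) V hlen
            (by omega) (by push_cast; omega)
            (fun k hk1 hk2 => h3 k hk1 (by omega))
            (fun k hk1 hk2 => h4 k hk1 (by omega))
            husedi
          have hcond : (start ≤ (i : Int) - (L.toNat : Int) + 1 ∧ used < (i : Int) - (L.toNat : Int) + 1) ↔
              ¬((i : Int) - L + 1 < start ∨ (i : Int) - L + 1 ≤ used) := by
            rcases tdich with ⟨he, hp⟩ | ⟨he, hp⟩ <;> rw [he] <;> omega
          by_cases hg : (i : Int) - L + 1 < start ∨ (i : Int) - L + 1 ≤ used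
          · rw [if_pos hg]
            rw [if_neg (fun hC => (hcond.mp hC) hg)] at spec
            rw [spec]
          · rw [if_neg hg]
            rw [if_pos (hcond.mpr hg)] at spec
            obtain ⟨V', hup, hlen', hpres⟩ := spec
            rw [hup]
            show aLoop line L V' (i + 1) = bLoop line L ((i : Int) + 1) (i : Int) (i + 1)
            refine ihn (i + 1) V' ((i : Int) + 1) (i : Int) (by omega) hlen' (by omega)
              (by push_cast; omega) ?_ ?_ ?_ ?_ ?_
            · intro k hk1 hk2
              have : k = i + 1 := by push_cast at hk1; omega
              rw [this]
            · intro _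
              have e1 : (((i : Int) + 1) - 1).toNat = i := by omega
              have e2 : ((i : Int) + 1).toNat = i + 1 := by omega
              rw [e1, e2]
              intro hcontra
              omega
            · intro k hk1 hk2
              rw [hpres k (by push_cast at hk1 ⊢; omega), h4 k (by omega) hk2]
              exact decide_eq_decide.mpr (by push_cast at hk1 ⊢; omega)
            · left; omega
            · push_cast; omega
        · by_cases hdesc : line.getD i 0 - 1 = line.getD (i + 1) 0
          · rw [if_neg hasc, if_pos hdesc,
              if_neg (show ¬(line.getD (i + 1) 0 - line.getD i 0 = 1) by omega),
              if_pos (show line.getD (i + 1) 0 - line.getD i 0 = -1 by omega),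
              if_neg (show ¬(used > (i : Int)) by omega)]
            have hn' : line.length - (i + 1) ≤ n := by omega
            have hs0' : (0 : Int) ≤ (i : Int) + 1 := by omega
            have hsi' : (i : Int) + 1 ≤ ((i + 1 : Nat) : Int) := by push_cast; omega
            have spec := downRamp_spec line (line.getD (i + 1) 0) L.toNat ((i : Int) + 1) V hlen
              (by omega) (by push_cast; omega)
              (fun k hk1 hk2 => by
                rw [h4 k (by omega) hk2]
                exact decide_eq_false (by push_cast at hk1 ⊢; omega))
            by_cases hC : ((i : Int) + 1 + (L.toNat : Int) ≤ (line.length : Int) ∧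
                ∀ k : Nat, (i : Int) + 1 ≤ (k : Int) → (k : Int) < (i : Int) + 1 + (L.toNat : Int) →
                  line.getD k 0 = line.getD (i + 1) 0)
            · obtain ⟨V', hd, hlen', hpres, hmark⟩ := spec.1 hC
              rw [hd]
              show aLoop line L V' (i + 1) = bLoop line L ((i : Int) + 1) ((i : Int) + L) (i + 1)
              refine ihn (i + 1) V' ((i : Int) + 1) ((i : Int) + L) hn' hlen' hs0'
                hsi' ?_ ?_ ?_ ?_ ?_
              · intro k hk1 hk2
                have : k = i + 1 := by push_cast at hk1; omega
                rw [this]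
              · intro _
                have e1 : (((i : Int) + 1) - 1).toNat = i := by omega
                have e2 : ((i : Int) + 1).toNat = i + 1 := by omega
                rw [e1, e2]
                intro hcontra
                omega
              · intro k hk1 hk2
                rw [hmark k (by push_cast at hk1 ⊢; omega) hk2]
                apply decide_eq_decide.mpr
                rcases tdich with ⟨he, hp⟩ | ⟨he, hp⟩ <;> rw [he] <;> push_cast at hk1 ⊢ <;> omega
              · rcases tdich with ⟨he, hp⟩ | ⟨he, hp⟩
                · by_cases hL1 : 1 ≤ L
                  · right
                    constructor
                    · have := hC.1; rw [he] at this; omega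
                    · intro k hk1 hk2
                      have e2 : ((i : Int) + 1).toNat = i + 1 := by omega
                      rw [e2]
                      exact hC.2 k hk1 (by rw [he]; omega)
                  · left; omega
                · left; omega
              · rcases tdich with ⟨he, hp⟩ | ⟨he, hp⟩
                · have := hC.1; rw [he] at this; push_cast; omega
                · push_cast; omega
            · rw [spec.2 hC]
              show false = bLoop line L ((i : Int) + 1) ((i : Int) + L) (i + 1)
              symm
              have hL1 : 1 ≤ L := by
                by_contra hc
                apply hC
                have he : (L.toNat : Int) = 0 := by simp [Int.toNat_of_nonpos (by omega : L ≤ 0)]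
                refine ⟨by rw [he]; push_cast; omega, fun k hk1 hk2 => ?_⟩
                exfalso; rw [he] at hk2; omega
              have he : (L.toNat : Int) = L := Int.toNat_of_nonneg (by omega)
              by_cases hbound : (i : Int) + 1 + L ≤ (line.length : Int)
              · have hmis : ∃ k : Nat, (i : Int) + 1 ≤ (k : Int) ∧ (k : Int) < (i : Int) + 1 + L ∧
                    line.getD k 0 ≠ line.getD (i + 1) 0 := by
                  by_contra hc
                  push_neg at hc
                  exact hC ⟨by rw [he]; omega, fun k hk1 hk2 => hc k hk1 (by rw [he] at hk2; omega)⟩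
                obtain ⟨k, hk1, hk2, hk3⟩ := hmis
                have hkne : k ≠ i + 1 := fun h => hk3 (by rw [h])
                apply bLoop_dead line L hL1 (i + 1) ((i : Int) + 1) ((i : Int) + L) hI
                  (by push_cast; push_cast at hk1 hk2; omega)
                exact Or.inr ⟨k, by push_cast; push_cast at hk1 hk2; omega,
                  by push_cast; push_cast at hk2; omega, by omega, hk3⟩
              · apply bLoop_dead line L hL1 (i + 1) ((i : Int) + 1) ((i : Int) + L) hI
                  (by push_cast; omega)
                exact Or.inl (by omega)
          · rw [if_neg hasc, if_neg hdesc,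
              if_neg (show ¬(line.getD (i + 1) 0 - line.getD i 0 = 1) by omega),
              if_neg (show ¬(line.getD (i + 1) 0 - line.getD i 0 = -1) by omega)]
    · rw [aLoop, bLoop, if_neg hI, if_neg hI]
      exact (decide_eq_true h6).symm

-- ===== VERDICT (by name: the statement is the Claim_ definition above) =====
theorem can_pass_spec : Claim_equal_can_pass := by
  intro line L _
  show can_pass line L = can_pass_alt line L
  unfold can_pass can_pass_alt
  apply main_loop
  · simp
  · norm_num
  · norm_num
  · intro k h1 h2
    have : k = 0 := by omega
    subst this; rfl
  · intro h; exact absurd h (by norm_num)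
  · intro k h1 h2
    have hd : (decide ((k : Int) ≤ -1)) = false := by simp; omega
    rw [hd]
    simp [List.getD, List.getElem?_replicate, h2]
  · left; norm_num
  · omega
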